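-- pv_equiv track=rewrite | github.com/vrnprkh/aoc2025 | d06/main.py | part1
-- ===== SOURCE A (Python) =====
-- def parseInput(data : str):
-- 	rows = data.split("\n")
--
--
--
-- 	numRows = rows[:len(rows) - 1]
-- 	intRows = []
-- 	for row in numRows:
-- 		intRows.append([])
-- 		for e in row.split(" "):
-- 			if len(e) > 0:
-- 				intRows[-1].append(int(e))
-- 	ops = rows[len(rows) - 1]
-- 	filterOps = []
-- 	for e in ops.split(" "):
-- 		if len(e) > 0:
-- 			filterOps.append(e)
--
--
-- 	return intRows, filterOps
--
-- def part1(data: str):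
-- 	nums, opdata = parseInput(data)
-- 	total = 0
-- 	for col in range(len(nums[0])):
-- 		op = opdata[col]
--
-- 		if op == "+":
-- 			for i in range(len(nums)):
-- 					total += nums[i][col]
-- 		else:
-- 			mult = 1
-- 			for i in range(len(nums)):
-- 				mult *= nums[i][col]
-- 			total += mult
--
-- 	return total
-- ===== SOURCE B (Python) =====
-- def part1(data: str):
--     rows = data.split("\n")
--     nums = [[int(e) for e in row.split(" ") if e] for row in rows[:-1]]
--     ops = [e for e in rows[-1].split(" ") if e]
--     acc = [0 if op == "+" else 1 for op in ops[:len(nums[0])]]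
--     for row in nums:
--         acc = [a + v if op == "+" else a * v for (a, v, op) in zip(acc, row, ops)]
--     return sum(acc)
-- ===== Notes on version B (the rewrite author's own statement) =====
-- stated objective: alternative
-- what changed: A makes a column-major pass that rescans all rows once per column; B parses with comprehensions and makes a single row-major streaming pass maintaining a per-column accumulator vector (initialised 0 for '+', 1 for '*') updated by zipping each row with the accumulator and the op list, then sums the vector.
import Mathlib
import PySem

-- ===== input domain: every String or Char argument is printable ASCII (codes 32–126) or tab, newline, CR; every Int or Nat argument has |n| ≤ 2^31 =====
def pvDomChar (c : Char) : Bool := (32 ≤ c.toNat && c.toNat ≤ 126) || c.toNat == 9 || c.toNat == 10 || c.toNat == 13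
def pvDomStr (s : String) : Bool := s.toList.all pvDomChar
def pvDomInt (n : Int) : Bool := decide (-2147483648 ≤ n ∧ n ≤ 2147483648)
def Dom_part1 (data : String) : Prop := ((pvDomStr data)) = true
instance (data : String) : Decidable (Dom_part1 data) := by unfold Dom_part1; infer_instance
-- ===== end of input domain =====

-- B replaces A's column-major rescans by one row-major streaming pass over a per-column
-- accumulator vector (alternative decomposition, same asymptotic cost).

-- ===== PORT A =====
def pvFilterIntA (row : String) : List Int :=
  ((PySem.Str.split? row " ").getD []).foldl
    (fun r e => if PySem.Str.len e > 0 then r ++ [(PySem.Int.ofStr? e).getD 0] else r) []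

def pvParseA (data : String) : List (List Int) × List String :=
  let rows := (PySem.Str.split? data "\n").getD []
  let numRows := PySem.List.slice rows none (some (PySem.List.len rows - 1))
  let intRows := numRows.foldl (fun acc row => acc ++ [pvFilterIntA row]) []
  let ops := PySem.List.pyGetD rows (PySem.List.len rows - 1) ""
  let filterOps := ((PySem.Str.split? ops " ").getD []).foldl
    (fun r e => if PySem.Str.len e > 0 then r ++ [e] else r) []
  (intRows, filterOps)

def part1 (data : String) : Int :=
  let nums := (pvParseA data).1
  let opdata := (pvParseA data).2
  (PySem.List.pyRange 0 (PySem.List.len (PySem.List.pyGetD nums 0 [])) 1).foldl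
    (fun total col =>
      if PySem.List.pyGetD opdata col "" = "+" then
        (PySem.List.pyRange 0 (PySem.List.len nums) 1).foldl
          (fun t i => t + PySem.List.pyGetD (PySem.List.pyGetD nums i []) col 0) total
      else
        total + (PySem.List.pyRange 0 (PySem.List.len nums) 1).foldl
          (fun m i => m * PySem.List.pyGetD (PySem.List.pyGetD nums i []) col 0) 1) 0

-- ===== PORT B =====
def part1_alt (data : String) : Int :=
  let rows := (PySem.Str.split? data "\n").getD []
  let nums := (PySem.List.slice rows none (some (-1))).map
      (fun row => (((PySem.Str.split? row " ").getD []).filter (fun e => e ≠ "")).map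
        (fun e => (PySem.Int.ofStr? e).getD 0))
  let ops := ((PySem.Str.split? (PySem.List.pyGetD rows (-1) "") " ").getD []).filter
      (fun e => e ≠ "")
  let acc0 := (PySem.List.slice ops none
      (some (PySem.List.len (PySem.List.pyGetD nums 0 [])))).map
      (fun op => if op = "+" then (0 : Int) else 1)
  (nums.foldl (fun acc row =>
      (acc.zip (row.zip ops)).map
        (fun t => if t.2.2 = "+" then t.1 + t.2.1 else t.1 * t.2.1)) acc0).sum

-- ===== PRECONDITION & SPEC =====
def pvRows (data : String) : List String := (PySem.Str.split? data "\n").getD []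
def pvToks (row : String) : List String :=
  ((PySem.Str.split? row " ").getD []).filter (fun e => e ≠ "")
def pvNcols (data : String) : Nat := (pvToks ((pvRows data).headD "")).length

-- Pre_ = exactly the inputs on which A returns: at least one number row (a '\n' present),
-- every token of the number rows a Python int literal, every number row and the op row
-- with at least as many tokens as the first row (otherwise A raises IndexError/ValueError).
def Pre_part1 (data : String) : Prop :=
  2 ≤ (pvRows data).length ∧
  (∀ row ∈ (pvRows data).dropLast, ∀ t ∈ pvToks row, (PySem.Int.ofStr? t).isSome = true) ∧
  (∀ row ∈ (pvRows data).dropLast, pvNcols data ≤ (pvToks row).length) ∧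
  pvNcols data ≤ (pvToks ((pvRows data).getLastD "")).length
instance (data : String) : Decidable (Pre_part1 data) := by unfold Pre_part1; infer_instance

def pvWitness_part1 : String := "1 2\n3 4\n+ *"

def Spec_part1 (data : String) (out : Int) : Prop := out = part1_alt data
instance (data : String) (out : Int) : Decidable (Spec_part1 data out) := by unfold Spec_part1; infer_instance

-- ===== CLAIM (what is proved, stated in full; the proofs are below) =====
def Claim_equal_part1 : Prop := ∀ (data : String), Dom_part1 data → Pre_part1 data → Spec_part1 data (part1 data)

-- ===== LEMMAS AND PROOFS =====

-- per-column step, initial value and total value of one column (proof vocabulary)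
def pvColf (ops : List String) (c : Nat) (a : Int) (row : List Int) : Int :=
  if ops.getD c "" = "+" then a + row.getD c 0 else a * row.getD c 0
def pvColinit (ops : List String) (c : Nat) : Int := if ops.getD c "" = "+" then 0 else 1
def pvColval (nums : List (List Int)) (ops : List String) (c : Nat) : Int :=
  nums.foldl (pvColf ops c) (pvColinit ops c)

-- A's token loop is filter-then-map
theorem pvToksFold {α : Type} (l : List String) (f : String → α) :
    l.foldl (fun r e => if PySem.Str.len e > 0 then r ++ [f e] else r) [] =
      (l.filter (fun e => e ≠ "")).map f := by
  rw [PySem.List.foldl_append_ite (fun e => PySem.Str.len e > 0) f l []]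
  simp only [List.nil_append]
  congr 1
  apply List.filter_congr
  intro e _
  by_cases he : e = ""
  · simp [he, PySem.Str.len_eq]
  · simp [he, PySem.Str.len_eq]
    exact Nat.pos_of_ne_zero (fun h0 => he (String.length_eq_zero_iff.mp h0))

-- A's column-major double loop computes the sum of the per-column values
theorem pvAcore (nums : List (List Int)) (ops : List String) (n : Nat) :
    (PySem.List.pyRange 0 (n : Int) 1).foldl
      (fun total col =>
        if PySem.List.pyGetD ops col "" = "+" then
          (PySem.List.pyRange 0 (PySem.List.len nums) 1).foldl
            (fun t i => t + PySem.List.pyGetD (PySem.List.pyGetD nums i []) col 0) total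
        else
          total + (PySem.List.pyRange 0 (PySem.List.len nums) 1).foldl
            (fun m i => m * PySem.List.pyGetD (PySem.List.pyGetD nums i []) col 0) 1) 0
    = ((List.range n).map (pvColval nums ops)).sum := by
  simp only [PySem.List.len_eq]
  have hstep : (fun (total col : Int) =>
        if PySem.List.pyGetD ops col "" = "+" then
          (PySem.List.pyRange 0 ((nums.length : Nat) : Int) 1).foldl
            (fun t i => t + PySem.List.pyGetD (PySem.List.pyGetD nums i []) col 0) total
        else
          total + (PySem.List.pyRange 0 ((nums.length : Nat) : Int) 1).foldl
            (fun m i => m * PySem.List.pyGetD (PySem.List.pyGetD nums i []) col 0) 1)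
      = (fun total col => total +
          (if PySem.List.pyGetD ops col "" = "+" then
            nums.foldl (fun a row => a + PySem.List.pyGetD row col 0) 0
          else nums.foldl (fun m row => m * PySem.List.pyGetD row col 0) 1)) := by
    funext total col
    rw [PySem.List.foldl_pyRange_zero_pyGetD' nums []
        (fun t row => t + PySem.List.pyGetD row col 0) total,
      PySem.List.foldl_pyRange_zero_pyGetD' nums []
        (fun m row => m * PySem.List.pyGetD row col 0) 1]
    by_cases hc : PySem.List.pyGetD ops col "" = "+" <;> simp [hc, PySem.List.foldl_add]
  rw [hstep, PySem.List.foldl_add, PySem.List.pyRange_zero_nat, List.map_map, zero_add]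
  congr 1
  apply List.map_congr_left
  intro c _
  by_cases hc : ops[c]?.getD "" = "+" <;>
    simp [Function.comp, pvColval, pvColinit, List.getD, hc, PySem.List.pyGetD_natCast] <;>
    (congr 1; funext a row; simp [pvColf, List.getD, hc])

-- ===== VERDICT (by name: the statement is the Claim_ definition above) =====
-- one row-step of B's streaming pass, elementwise
theorem pvBstep (ops : List String) (row : List Int) (n : Nat) (g : Nat → Int)
    (hn : n ≤ ops.length) (hr : n ≤ row.length) :
    (((List.range n).map g).zip (row.zip ops)).map
        (fun t => if t.2.2 = "+" then t.1 + t.2.1 else t.1 * t.2.1)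
    = (List.range n).map (fun c => pvColf ops c (g c) row) := by
  apply List.ext_getElem
  · simp; omega
  · intro i h1 h2
    have hi : i < n := by simp at h2; exact h2
    simp [List.getElem_zip, pvColf, List.getD,
      List.getElem?_eq_getElem (by omega : i < ops.length),
      List.getElem?_eq_getElem (by omega : i < row.length)]

-- B's whole streaming pass yields the per-column values
theorem pvBfold (nums : List (List Int)) (ops : List String) (n : Nat) (g : Nat → Int)
    (hn : n ≤ ops.length) (hr : ∀ r ∈ nums, n ≤ r.length) :
    nums.foldl (fun acc row =>
        (acc.zip (row.zip ops)).map
          (fun t => if t.2.2 = "+" then t.1 + t.2.1 else t.1 * t.2.1)) ((List.range n).map g)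
    = (List.range n).map (fun c => nums.foldl (pvColf ops c) (g c)) := by
  induction nums generalizing g with
  | nil => simp
  | cons row rest ih =>
    rw [List.foldl_cons, pvBstep ops row n g hn (hr row (by simp)),
      ih (fun c => pvColf ops c (g c) row) (fun r hrr => hr r (by simp [hrr]))]
    simp [List.foldl_cons]

-- B's initial accumulator, elementwise
theorem pvAcc0 (ops : List String) (n : Nat) (hn : n ≤ ops.length) :
    (ops.take n).map (fun op => if op = "+" then (0 : Int) else 1)
    = (List.range n).map (pvColinit ops) := by
  apply List.ext_getElem
  · simp; omega
  · intro i h1 h2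
    have hi : i < n := by simp at h2; exact h2
    simp [pvColinit, List.getD, List.getElem?_eq_getElem (by omega : i < ops.length)]

theorem pvHeadD {α : Type} (l : List α) (d : α) (h : l ≠ []) :
    l.headD d = l.getD 0 d := by
  cases l with
  | nil => exact absurd rfl h
  | cons a t => rfl

theorem pvGetLastD {α : Type} (l : List α) (d : α) (h : l ≠ []) :
    l.getLastD d = l.getLast h := by
  cases l with
  | nil => exact absurd rfl h
  | cons a t => simp [List.getLastD_eq_getLast?, List.getLast?_eq_some_getLast]

theorem part1_spec : Claim_equal_part1 := by
  intro data _ hpre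
  unfold Pre_part1 pvNcols pvToks pvRows at hpre
  obtain ⟨h2, _hint, hcols, hops⟩ := hpre
  unfold Spec_part1 part1 part1_alt pvParseA pvFilterIntA
  set rows := (PySem.Str.split? data "\n").getD [] with hrowsdef
  have hne : rows ≠ [] := by
    intro h; rw [h] at h2; simp at h2
  -- the two slices of the number rows agree
  have hnr : PySem.List.slice rows none (some (PySem.List.len rows - 1)) = rows.dropLast := by
    rw [PySem.List.len_eq]
    have hcast : ((rows.length : Int) - 1) = ((rows.length - 1 : Nat) : Int) := by omega
    rw [hcast, PySem.List.slice_to_natCast, List.dropLast_eq_take]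
  have hb1 : PySem.List.slice rows none (some (-1)) = rows.dropLast :=
    PySem.List.slice_to_neg_one rows
  -- the two reads of the op row agree
  have hlast : PySem.List.pyGetD rows (PySem.List.len rows - 1) "" =
      PySem.List.pyGetD rows (-1) "" := by
    rw [PySem.List.pyGetD_neg_one rows "" hne, PySem.List.len_eq,
      PySem.List.pyGetD_eq_getElem rows "" (by omega) (by omega),
      List.getLast_eq_getElem]
    congr 1
    omega
  have hlastD : PySem.List.pyGetD rows (-1) "" = rows.getLastD "" := by
    rw [PySem.List.pyGetD_neg_one rows "" hne, pvGetLastD rows "" hne]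
  simp only [hnr, hb1, hlast, hlastD, PySem.List.foldl_append_singleton_eq_map, pvToksFold,
    List.nil_append, List.map_id']
  set NUMS := List.map
      (fun x => List.map (fun e => (PySem.Int.ofStr? e).getD 0)
        (List.filter (fun e => decide (e ≠ "")) ((PySem.Str.split? x " ").getD [])))
      rows.dropLast with hNdef
  set OPS := List.filter (fun e => decide (e ≠ ""))
      ((PySem.Str.split? (rows.getLastD "") " ").getD []) with hOdef
  set n := (List.filter (fun e => decide (e ≠ ""))
      ((PySem.Str.split? (rows.headD "") " ").getD [])).length with hndef
  have hNlen : NUMS.length = rows.length - 1 := by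
    rw [hNdef]; simp
  have hfirst : PySem.List.pyGetD NUMS 0 [] =
      List.map (fun e => (PySem.Int.ofStr? e).getD 0)
        (List.filter (fun e => decide (e ≠ "")) ((PySem.Str.split? (rows.headD "") " ").getD [])) := by
    rw [PySem.List.pyGetD_zero, List.getD_eq_getElem _ _ (by omega : 0 < NUMS.length)]
    simp only [hNdef, List.getElem_map, List.getElem_dropLast]
    rw [pvHeadD rows "" hne, List.getD_eq_getElem _ _ (by omega : 0 < rows.length)]
  have hn : PySem.List.len (PySem.List.pyGetD NUMS 0 []) = ((n : Nat) : Int) := by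
    rw [hfirst, PySem.List.len_eq, List.length_map]
  have hnOPS : n ≤ OPS.length := hops
  have hr : ∀ r ∈ NUMS, n ≤ r.length := by
    intro r hrm
    rw [hNdef] at hrm
    obtain ⟨row, hrow, rfl⟩ := List.mem_map.mp hrm
    rw [List.length_map]
    exact hcols row hrow
  rw [hn, pvAcore NUMS OPS n, PySem.List.slice_to_natCast, pvAcc0 OPS n hnOPS,
    pvBfold NUMS OPS n (pvColinit OPS) hnOPS hr]
  rfl
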